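-- pv_equiv track=rewrite | github.com/rrwick/Polypolish-paper | scripts/confusion_matrix.py | iterate_seq
-- ===== SOURCE A (Python) =====
-- def iterate_seq(seq):
--     """
--     This generator iterates through a sequence one base at a time, returning start/end slice
--     positions. Gaps are included after a base, so each returned slice positions will include
--     exactly one base followed by zero or more gaps.
--     """
--     if not seq:
--         return
--     start = 0
--     while True:
--         end = start + 1
--         while True:
--             if end < len(seq) and seq[end] == '-':
--                 end += 1
--             else:
--                 break
--         yield start, end
--         start = end
--         if start >= len(seq):
--             return
-- ===== SOURCE B (Python) =====
-- def iterate_seq(seq):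
--     """Same slices via a precomputed token-start index paired with its own tail."""
--     if not seq:
--         return
--     starts = [0] + [i for i in range(1, len(seq)) if seq[i] != '-'] + [len(seq)]
--     for s, e in zip(starts, starts[1:]):
--         yield s, e
-- ===== Notes on version B (the rewrite author's own statement) =====
-- stated objective: simpler
-- what changed: Replaces A's nested while-loop streaming tokenizer with a build-an-index decomposition: one comprehension collects all token start positions (plus a len(seq) sentinel) and the slices are read off by zipping that list with its own tail.
import Mathlib
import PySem

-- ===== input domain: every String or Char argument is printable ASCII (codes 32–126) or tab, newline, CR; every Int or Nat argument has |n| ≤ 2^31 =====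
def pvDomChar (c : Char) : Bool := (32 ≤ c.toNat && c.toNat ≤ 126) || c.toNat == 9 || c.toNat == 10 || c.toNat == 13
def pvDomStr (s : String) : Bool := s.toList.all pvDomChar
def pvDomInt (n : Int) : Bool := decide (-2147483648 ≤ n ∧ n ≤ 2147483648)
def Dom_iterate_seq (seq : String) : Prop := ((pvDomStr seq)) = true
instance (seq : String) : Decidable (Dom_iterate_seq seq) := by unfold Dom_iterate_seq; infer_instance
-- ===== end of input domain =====

-- B replaces A's nested while-loop tokenizer by precomputing the token-start index and zipping it with its tail; same O(n) cost, simpler shape.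

-- ===== PORT A =====
-- inner 'while True' of A: advance end over '-' gaps (out-of-range lookup gives none = loop exit)
def skipGapsA (cs : List Char) (e : Nat) : Nat :=
  if h : cs[e]? = some '-' then skipGapsA cs (e + 1) else e
termination_by cs.length - e
decreasing_by
  obtain ⟨hlt, -⟩ := List.getElem?_eq_some_iff.mp h
  omega

-- termination fact the outer loop cites: skipGapsA never moves left
theorem skipGapsA_ge (cs : List Char) (e : Nat) : e ≤ skipGapsA cs e := by
  fun_induction skipGapsA with
  | case1 e h ih => omega
  | case2 e h => omega

-- outer 'while True' of A: yield (start, end), continue from end until start ≥ len(seq)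
def loopA (cs : List Char) (start : Nat) : List (Int × Int) :=
  let e := skipGapsA cs (start + 1)
  if e ≥ cs.length then [((start : Int), (e : Int))]
  else ((start : Int), (e : Int)) :: loopA cs e
termination_by cs.length - start
decreasing_by
  have := skipGapsA_ge cs (start + 1)
  omega

def iterate_seq (seq : String) : List (Int × Int) :=
  if seq.toList.isEmpty then [] else loopA seq.toList 0

-- ===== PORT B =====
def iterate_seq_alt (seq : String) : List (Int × Int) :=
  let cs := seq.toList
  if cs.isEmpty then []
  else
    let starts : List Int :=
      ((0 : Int) :: ((List.range' 1 (cs.length - 1)).filter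
        (fun i => !(cs[i]? == some '-'))).map (fun i => (i : Int))) ++ [(cs.length : Int)]
    starts.zip (starts.drop 1)

-- ===== PRECONDITION & SPEC =====
def Spec_iterate_seq (seq : String) (out : List (Int × Int)) : Prop := out = iterate_seq_alt seq
instance (seq : String) (out : List (Int × Int)) : Decidable (Spec_iterate_seq seq out) := by unfold Spec_iterate_seq; infer_instance

-- ===== CLAIM (what is proved, stated in full; the proofs are below) =====
def Claim_equal_iterate_seq : Prop := ∀ (seq : String), Dom_iterate_seq seq → Spec_iterate_seq seq (iterate_seq seq)

-- ===== LEMMAS AND PROOFS =====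

-- token starts from position j onward, as Int, with no sentinel
def tokStarts (cs : List Char) (j : Nat) : List Int :=
  ((List.range' j (cs.length - j)).filter (fun i => !(cs[i]? == some '-'))).map (fun i => (i : Int))

-- zip-with-tail pairing
def zp (l : List Int) : List (Int × Int) := l.zip (l.drop 1)

theorem tokStarts_len (cs : List Char) : tokStarts cs cs.length = [] := by
  simp [tokStarts]

theorem tokStarts_cons (cs : List Char) (j : Nat) (hj : j < cs.length)
    (h : ¬ cs[j]? = some '-') : tokStarts cs j = (j : Int) :: tokStarts cs (j + 1) := by
  unfold tokStarts
  rw [show cs.length - j = (cs.length - (j + 1)) + 1 by omega, List.range'_succ]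
  simp [h]

theorem tokStarts_gap (cs : List Char) (j : Nat)
    (h : cs[j]? = some '-') : tokStarts cs j = tokStarts cs (j + 1) := by
  obtain ⟨hj, -⟩ := List.getElem?_eq_some_iff.mp h
  unfold tokStarts
  rw [show cs.length - j = (cs.length - (j + 1)) + 1 by omega, List.range'_succ]
  simp [h]

theorem skipGapsA_le (cs : List Char) (e : Nat) (he : e ≤ cs.length) :
    skipGapsA cs e ≤ cs.length := by
  fun_induction skipGapsA with
  | case1 e h ih =>
    obtain ⟨hlt, -⟩ := List.getElem?_eq_some_iff.mp h
    exact ih (by omega)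
  | case2 e h => exact he

theorem skipGapsA_stop (cs : List Char) (e : Nat) :
    ¬ cs[skipGapsA cs e]? = some '-' := by
  fun_induction skipGapsA with
  | case1 e h ih => exact ih
  | case2 e h => exact h

theorem tokStarts_skip (cs : List Char) (e : Nat) :
    tokStarts cs e = tokStarts cs (skipGapsA cs e) := by
  fun_induction skipGapsA with
  | case1 e h ih => rw [tokStarts_gap cs e h]; exact ih
  | case2 e h => rfl

theorem loopA_eq (cs : List Char) (start : Nat) (hs : start < cs.length) :
    loopA cs start = zp ((start : Int) :: (tokStarts cs (start + 1) ++ [(cs.length : Int)])) := by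
  fun_induction loopA with
  | case1 start e he =>
    -- e ≥ cs.length: e = cs.length and tokStarts (start+1) = []
    have h1 := skipGapsA_le cs (start + 1) (by omega)
    have he' : e = cs.length := by omega
    have h2 : tokStarts cs (start + 1) = [] := by
      rw [tokStarts_skip]
      show tokStarts cs e = []
      rw [he', tokStarts_len]
    rw [h2, he']
    rfl
  | case2 start e he ih =>
    have hlt : e < cs.length := by omega
    have hge : start + 1 ≤ e := skipGapsA_ge cs (start + 1)
    have h2 : tokStarts cs (start + 1) = (e : Int) :: tokStarts cs (e + 1) := by
      rw [tokStarts_skip]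
      exact tokStarts_cons cs e hlt (skipGapsA_stop cs (start + 1))
    rw [ih hlt, h2]
    rfl

-- ===== VERDICT (by name: the statement is the Claim_ definition above) =====
theorem iterate_seq_spec : Claim_equal_iterate_seq := by
  intro seq _
  unfold Spec_iterate_seq iterate_seq iterate_seq_alt
  by_cases h : seq.toList.isEmpty
  · simp [h]
  · simp only [h]
    have hlen : 0 < seq.toList.length := by
      by_contra hn
      have hnil : seq.toList = [] := by cases seq.toList <;> simp_all
      simp [hnil] at h
    rw [loopA_eq seq.toList 0 hlen]
    rfl
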